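-- pv_equiv track=rewrite | github.com/hilfialkaff/network-scheduling-simulator | src/topology.py | k_path_validity
-- ===== SOURCE A (Python) =====
-- def k_path_validity(path):
--     se_count = 0
--     sa_count = 0
--     sc_count = 0
--     h_count = 0
--     ret = True
--
--     # print "path: ", path
--     for p in path:
--         if 'se' in p:
--             se_count += 1
--         if 'sa' in p:
--             sa_count += 1
--         if 'sc' in p:
--             sc_count += 1
--         if 'h' in p:
--             h_count += 1
--
--         if h_count > 2:
--             ret = False
--             break
--
--         if sc_count == 0 and (sa_count > 1 or se_count > 1):
--             ret = False
--             break
--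
--     # print "count: ", se_count, sa_count, sc_count, h_count
--     return ret
-- ===== SOURCE B (Python) =====
-- def k_path_validity(path):
--     # No prefix violates iff: at most 2 'h'-elements in total, and among the
--     # elements strictly before the first 'sc'-element at most one 'sa' and one 'se'.
--     if sum('h' in p for p in path) > 2:
--         return False
--     pre = []
--     for p in path:
--         if 'sc' in p:
--             break
--         pre.append(p)
--     return sum('sa' in p for p in pre) <= 1 and sum('se' in p for p in pre) <= 1
-- ===== Notes on version B (the rewrite author's own statement) =====
-- stated objective: simpler
-- what changed: Replaces the single fused loop threading four counters and a break flag by three independent whole-list counts: a total 'h' count, and 'sa'/'se' counts restricted to the elements before the first 'sc' element, exploiting that counts are monotone so 'some prefix violates' equals 'the totals violate'.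
import Mathlib
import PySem

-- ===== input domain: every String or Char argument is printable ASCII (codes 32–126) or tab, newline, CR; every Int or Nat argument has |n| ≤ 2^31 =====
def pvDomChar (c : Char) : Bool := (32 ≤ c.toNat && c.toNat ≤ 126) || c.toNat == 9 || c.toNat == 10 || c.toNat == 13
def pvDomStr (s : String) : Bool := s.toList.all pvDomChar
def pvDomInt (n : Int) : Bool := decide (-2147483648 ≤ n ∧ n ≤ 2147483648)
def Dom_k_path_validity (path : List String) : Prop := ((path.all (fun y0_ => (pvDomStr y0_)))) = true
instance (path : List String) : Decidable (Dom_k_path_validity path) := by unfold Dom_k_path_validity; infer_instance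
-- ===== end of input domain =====

-- B replaces A's fused counter loop with a break by three independent counts (total 'h',
-- and 'sa'/'se' over the elements before the first 'sc' element); objective: simpler.

-- ===== PORT A =====
-- the for-loop of A: state = (se, sa, sc, h) counters; break returns False
def kLoopA : List String → Int → Int → Int → Int → Bool
  | [], _, _, _, _ => true
  | p :: rest, se, sa, sc, h =>
    let se' := if PySem.Str.isIn "se" p then se + 1 else se
    let sa' := if PySem.Str.isIn "sa" p then sa + 1 else sa
    let sc' := if PySem.Str.isIn "sc" p then sc + 1 else sc
    let h'  := if PySem.Str.isIn "h" p then h + 1 else h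
    if h' > 2 then false
    else if sc' = 0 ∧ (sa' > 1 ∨ se' > 1) then false
    else kLoopA rest se' sa' sc' h'

def k_path_validity (path : List String) : Bool := kLoopA path 0 0 0 0

-- ===== PORT B =====
def k_path_validity_alt (path : List String) : Bool :=
  -- h_total = sum('h' in p for p in path); if h_total > 2: return False
  if 2 < path.countP (fun p => PySem.Str.isIn "h" p) then false
  else
    -- the pre-loop with break collects the prefix before the first 'sc' element
    let pre := path.takeWhile (fun p => !(PySem.Str.isIn "sc" p))
    decide (pre.countP (fun p => PySem.Str.isIn "sa" p) ≤ 1) &&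
    decide (pre.countP (fun p => PySem.Str.isIn "se" p) ≤ 1)

-- ===== PRECONDITION & SPEC =====
def Spec_k_path_validity (path : List String) (out : Bool) : Prop := out = k_path_validity_alt path
instance (path : List String) (out : Bool) : Decidable (Spec_k_path_validity path out) := by unfold Spec_k_path_validity; infer_instance

-- ===== CLAIM (what is proved, stated in full; the proofs are below) =====
def Claim_equal_k_path_validity : Prop := ∀ (path : List String), Dom_k_path_validity path → Spec_k_path_validity path (k_path_validity path)

-- ===== LEMMAS AND PROOFS =====

-- Characterisation of A's loop: given the invariants that hold at every loop entry
-- (counters nonnegative, no past violation), the loop returns true iff the final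
-- h-total stays ≤ 2 and, unless an 'sc' was already seen, the 'sa'/'se' counts over
-- the part of the remaining path before its first 'sc' element stay ≤ 1.
theorem kLoopA_eq (path : List String) : ∀ (se sa sc h : Int),
    0 ≤ se → 0 ≤ sa → 0 ≤ sc → h ≤ 2 → (sc = 0 → sa ≤ 1 ∧ se ≤ 1) →
    kLoopA path se sa sc h =
      (decide (h + (path.countP (fun p => PySem.Str.isIn "h" p) : Int) ≤ 2) &&
       (decide (sc ≠ 0) ||
        (decide (sa + (((path.takeWhile (fun p => !(PySem.Str.isIn "sc" p))).countP
            (fun p => PySem.Str.isIn "sa" p)) : Int) ≤ 1) &&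
         decide (se + (((path.takeWhile (fun p => !(PySem.Str.isIn "sc" p))).countP
            (fun p => PySem.Str.isIn "se" p)) : Int) ≤ 1)))) := by
  induction path with
  | nil =>
    intro se sa sc h hse hsa hsc hh hinv
    simp only [kLoopA, List.countP_nil, List.takeWhile_nil]
    rw [Bool.eq_iff_iff]
    simp only [Bool.and_eq_true, Bool.or_eq_true, decide_eq_true_eq, true_iff]
    push_cast
    omega
  | cons p rest ih =>
    intro se sa sc h hse hsa hsc hh hinv
    simp only [kLoopA]
    cases hbse : PySem.Str.isIn "se" p <;> cases hbsa : PySem.Str.isIn "sa" p <;>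
      cases hbsc : PySem.Str.isIn "sc" p <;> cases hbh : PySem.Str.isIn "h" p <;>
      simp only [hbse, hbsa, hbsc, hbh, if_true, if_false, Bool.not_true, Bool.not_false,
        List.countP_cons, List.takeWhile_cons, List.countP_nil,
        Bool.false_eq_true] <;>
      split_ifs with h1 h2
    all_goals try (refine (ih _ _ _ _ ?_ ?_ ?_ ?_ ?_).trans ?_ <;> try omega)
    all_goals rw [Bool.eq_iff_iff]
    all_goals simp only [Bool.and_eq_true, Bool.or_eq_true, decide_eq_true_eq,
      Bool.false_eq_true, false_iff]
    all_goals push_cast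
    all_goals omega

-- ===== VERDICT (by name: the statement is the Claim_ definition above) =====
theorem k_path_validity_spec : Claim_equal_k_path_validity := by
  intro path _
  unfold Spec_k_path_validity k_path_validity k_path_validity_alt
  rw [kLoopA_eq path 0 0 0 0 le_rfl le_rfl le_rfl (by norm_num) (fun _ => ⟨by norm_num, by norm_num⟩)]
  split_ifs with hh
  all_goals rw [Bool.eq_iff_iff]
  all_goals simp only [Bool.and_eq_true, Bool.or_eq_true, decide_eq_true_eq,
    Bool.false_eq_true]
  all_goals push_cast
  all_goals try simp only [false_or, iff_false, false_iff]
  all_goals omega
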